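-- pv_equiv track=rewrite | github.com/DainDwarf/AdventOfCode | 2017/Day21/day21.py | genAllMatches
-- ===== SOURCE A (Python) =====
-- def flip(slashed_grid):
--     """Returns the slashed_grid, flipped left/right."""
--     return '/'.join(s[::-1] for s in slashed_grid.split('/'))
--
-- def rotateL(slashed_grid):
--     """Returns the left-rotation of the slashed_grid."""
--     return '/'.join(''.join(s[-i-1] for s in slashed_grid.split('/')) for i in range(len(slashed_grid.split('/'))))
--
-- def genAllMatches(slashed_grid):
--     """Generates all slashed_grids that can match an input slashed_grid.
--
--     You will get some matches several times, but who cares, right?"""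
--     rotation = slashed_grid
--     for i in range(4):
--         rotation = rotateL(rotation)
--         yield rotation
--     rotation = flip(slashed_grid)
--     for i in range(4):
--         rotation = rotateL(rotation)
--         yield rotation
-- ===== SOURCE B (Python) =====
-- def genAllMatches(slashed_grid):
--     """Yield the same 8 symmetries as A, but from closed-form coordinate
--     formulas on a single split, instead of iterating rotateL."""
--     rows = slashed_grid.split('/')
--     n = len(rows)
--     # first left-rotation of the input (rows may be ragged: index from each row's own end)
--     r1 = [''.join(row[len(row) - 1 - i] for row in rows) for i in range(n)]
--     # rotate(flip(input)): reversing a row then indexing from its end is indexing from its start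
--     f1 = [''.join(row[i] for row in rows) for i in range(n)]
--     for g in (r1, f1):
--         yield '/'.join(g)
--         yield '/'.join(''.join(g[j][n - 1 - i] for j in range(n)) for i in range(n))   # 90 deg left
--         yield '/'.join(r[::-1] for r in reversed(g))                                   # 180 deg
--         yield '/'.join(''.join(g[n - 1 - j][i] for j in range(n)) for i in range(n))   # 270 deg left
-- ===== Notes on version B (the rewrite author's own statement) =====
-- stated objective: alternative
-- what changed: B splits the grid once and produces each of the 8 symmetries by a direct closed-form coordinate formula (first rotation and transpose computed from the rows, then 90/180/270-degree maps by indexing), instead of A's re-splitting and re-joining the string through 8 chained rotateL calls.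
import Mathlib
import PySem

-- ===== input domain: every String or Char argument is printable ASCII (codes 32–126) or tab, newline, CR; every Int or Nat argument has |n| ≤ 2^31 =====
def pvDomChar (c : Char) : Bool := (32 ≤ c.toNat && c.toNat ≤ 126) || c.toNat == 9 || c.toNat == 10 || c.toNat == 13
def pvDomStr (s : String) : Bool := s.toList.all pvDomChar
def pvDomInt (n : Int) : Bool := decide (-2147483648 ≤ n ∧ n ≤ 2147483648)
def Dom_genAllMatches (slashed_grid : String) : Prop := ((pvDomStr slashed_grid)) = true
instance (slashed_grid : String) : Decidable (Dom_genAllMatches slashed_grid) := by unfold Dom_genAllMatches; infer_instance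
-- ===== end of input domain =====

-- B generates the 8 symmetries from closed-form coordinate formulas on a single split,
-- instead of A's 8 chained rotateL string passes; equivalence is about the yielded sequence.

-- ===== PORT A =====
-- '/'.join(s[::-1] for s in slashed_grid.split('/'))
def flipPy (slashed_grid : String) : String :=
  PySem.Str.join "/" (((PySem.Str.split? slashed_grid "/").getD []).map
    (fun s => (PySem.Str.slice? s none none (-1)).getD ""))

-- '/'.join(''.join(s[-i-1] for s in split) for i in range(len(split)))
-- ''.join of one-character strings is ported as String.ofList of the characters (exact).
def rotateLPy (slashed_grid : String) : String :=
  let rows := (PySem.Str.split? slashed_grid "/").getD []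
  PySem.Str.join "/" ((PySem.List.pyRange 0 (rows.length : Int) 1).map (fun i =>
    String.ofList (rows.map (fun s => (PySem.Str.pyGet? s (-i - 1)).getD ' '))))

def genAllMatches (slashed_grid : String) : List String :=
  let step := fun (st : String × List String) (_ : Int) =>
    let r := rotateLPy st.1
    (r, st.2 ++ [r])
  let s1 := (PySem.List.pyRange 0 4 1).foldl step (slashed_grid, [])
  ((PySem.List.pyRange 0 4 1).foldl step (flipPy slashed_grid, s1.2)).2

-- ===== PORT B =====
def genAllMatches_alt (slashed_grid : String) : List String :=
  let rows := (PySem.Str.split? slashed_grid "/").getD []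
  let n : Int := (rows.length : Int)
  let r1 := (PySem.List.pyRange 0 n 1).map (fun i =>
    String.ofList (rows.map (fun row => (PySem.Str.pyGet? row (PySem.Str.len row - 1 - i)).getD ' ')))
  let f1 := (PySem.List.pyRange 0 n 1).map (fun i =>
    String.ofList (rows.map (fun row => (PySem.Str.pyGet? row i).getD ' ')))
  let block := fun (gr : List String) =>
    [ PySem.Str.join "/" gr,
      PySem.Str.join "/" ((PySem.List.pyRange 0 n 1).map (fun i =>
        String.ofList ((PySem.List.pyRange 0 n 1).map (fun j =>
          (PySem.Str.pyGet? (PySem.List.pyGetD gr j "") (n - 1 - i)).getD ' ')))),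
      PySem.Str.join "/" (gr.reverse.map (fun r => (PySem.Str.slice? r none none (-1)).getD "")),
      PySem.Str.join "/" ((PySem.List.pyRange 0 n 1).map (fun i =>
        String.ofList ((PySem.List.pyRange 0 n 1).map (fun j =>
          (PySem.Str.pyGet? (PySem.List.pyGetD gr (n - 1 - j) "") i).getD ' ')))) ]
  block r1 ++ block f1

-- ===== PRECONDITION & SPEC =====
-- A raises IndexError iff some row of the slash-split grid is shorter than the number of rows;
-- Pre_ is exactly the set of inputs on which A returns normally.
def Pre_genAllMatches (slashed_grid : String) : Prop :=
  ∀ r ∈ (PySem.Str.split? slashed_grid "/").getD [],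
    (((PySem.Str.split? slashed_grid "/").getD []).length : Int) ≤ PySem.Str.len r
instance (slashed_grid : String) : Decidable (Pre_genAllMatches slashed_grid) := by
  unfold Pre_genAllMatches; infer_instance

def pvWitness_genAllMatches : String := "ab/cd"

def Spec_genAllMatches (slashed_grid : String) (out : List String) : Prop := out = genAllMatches_alt slashed_grid
instance (slashed_grid : String) (out : List String) : Decidable (Spec_genAllMatches slashed_grid out) := by unfold Spec_genAllMatches; infer_instance

-- ===== CLAIM (what is proved, stated in full; the proofs are below) =====
def Claim_equal_genAllMatches : Prop := ∀ (slashed_grid : String), Dom_genAllMatches slashed_grid → Pre_genAllMatches slashed_grid → Spec_genAllMatches slashed_grid (genAllMatches slashed_grid)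

-- ===== LEMMAS AND PROOFS =====

theorem pvGoFree (fuel : Nat) : ∀ (l cur : List Char) (acc : List (List Char)),
    l.length < fuel → '/' ∉ cur → (∀ p ∈ acc, '/' ∉ p) →
    ∀ p ∈ PySem.Chars.splitOn.go ['/'] fuel l cur acc, '/' ∉ p := by
  induction fuel with
  | zero => intro l cur acc h; omega
  | succ f ih =>
    intro l cur acc hl hcur hacc p hp
    match l with
    | [] =>
      simp [PySem.Chars.splitOn.go] at hp
      rcases hp with h | h
      · exact hacc p h
      · subst h; simpa using hcur
    | c :: rest =>
      rw [show PySem.Chars.splitOn.go ['/'] (f+1) (c :: rest) cur acc =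
          if ['/'].isPrefixOf (c :: rest) then
            PySem.Chars.splitOn.go ['/'] f (List.drop 1 (c :: rest)) [] (cur.reverse :: acc)
          else PySem.Chars.splitOn.go ['/'] f rest (c :: cur) acc from by
        simp [PySem.Chars.splitOn.go]] at hp
      by_cases hc : c = '/'
      · rw [if_pos (by simp [hc, List.isPrefixOf])] at hp
        refine ih rest [] _ (by simpa using hl) (by simp) ?_ p hp
        intro q hq
        rcases List.mem_cons.mp hq with h | h
        · subst h; simpa using hcur
        · exact hacc q h
      · rw [if_neg (by simp [List.isPrefixOf]; exact fun h => hc h.symm)] at hp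
        refine ih rest (c :: cur) acc (by simpa using hl) ?_ hacc p hp
        intro h
        rcases List.mem_cons.mp h with h | h
        · exact hc h.symm
        · exact hcur h

theorem pvGoNeNil (fuel : Nat) : ∀ (l cur : List Char) (acc : List (List Char)),
    PySem.Chars.splitOn.go ['/'] fuel l cur acc ≠ [] := by
  induction fuel with
  | zero => intro l cur acc; simp [PySem.Chars.splitOn.go]
  | succ f ih =>
    intro l cur acc
    match l with
    | [] => simp [PySem.Chars.splitOn.go]
    | c :: rest =>
      rw [show PySem.Chars.splitOn.go ['/'] (f+1) (c :: rest) cur acc =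
          if ['/'].isPrefixOf (c :: rest) then
            PySem.Chars.splitOn.go ['/'] f (List.drop 1 (c :: rest)) [] (cur.reverse :: acc)
          else PySem.Chars.splitOn.go ['/'] f rest (c :: cur) acc from by
        simp [PySem.Chars.splitOn.go]]
      split <;> exact ih _ _ _

theorem pvGoSkip (w : List Char) : ∀ (fuel : Nat) (l cur : List Char) (acc : List (List Char)),
    '/' ∉ w → w.length + l.length < fuel →
    PySem.Chars.splitOn.go ['/'] fuel (w ++ l) cur acc
      = PySem.Chars.splitOn.go ['/'] (fuel - w.length) l (w.reverse ++ cur) acc := by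
  induction w with
  | nil => intro fuel l cur acc _ _; simp
  | cons c w ih =>
    intro fuel l cur acc hw hf
    match fuel with
    | 0 => simp at hf
    | f + 1 =>
      have hc : c ≠ '/' := fun h => hw (by simp [h])
      rw [show PySem.Chars.splitOn.go ['/'] (f+1) (c :: w ++ l) cur acc =
          if ['/'].isPrefixOf (c :: (w ++ l)) then
            PySem.Chars.splitOn.go ['/'] f (List.drop 1 (c :: (w ++ l))) [] (cur.reverse :: acc)
          else PySem.Chars.splitOn.go ['/'] f (w ++ l) (c :: cur) acc from by
        simp [PySem.Chars.splitOn.go]]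
      rw [if_neg (by simp [List.isPrefixOf]; exact fun h => hc h.symm)]
      rw [ih f l (c :: cur) acc (fun h => hw (by simp [h])) (by simp at hf ⊢; omega)]
      have hfuel : f + 1 - (c :: w).length = f - w.length := by simp
      rw [hfuel]
      simp

theorem pvJoinCons (x y : List Char) (xs : List (List Char)) :
    PySem.Chars.join ['/'] (x :: y :: xs) = x ++ '/' :: PySem.Chars.join ['/'] (y :: xs) := by
  simp [PySem.Chars.join, List.intercalate, List.intersperse]

theorem pvJoinSingleton (x : List Char) : PySem.Chars.join ['/'] [x] = x := by
  simp [PySem.Chars.join, List.intercalate]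

theorem pvGoJoin (parts : List (List Char)) : ∀ (fuel : Nat) (acc : List (List Char)),
    parts ≠ [] → (∀ p ∈ parts, '/' ∉ p) →
    (PySem.Chars.join ['/'] parts).length < fuel →
    PySem.Chars.splitOn.go ['/'] fuel (PySem.Chars.join ['/'] parts) [] acc
      = acc.reverse ++ parts := by
  induction parts with
  | nil => intro _ _ h; exact absurd rfl h
  | cons p ps ih =>
    intro fuel acc _ hfree hlen
    match ps with
    | [] =>
      rw [pvJoinSingleton] at hlen ⊢
      rw [show p = p ++ ([] : List Char) from by simp, pvGoSkip p fuel [] [] acc (hfree p (by simp)) (by simpa using hlen)]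
      match hfm : fuel - p.length with
      | 0 => omega
      | f + 1 => simp [PySem.Chars.splitOn.go]
    | q :: qs =>
      rw [pvJoinCons] at hlen ⊢
      rw [pvGoSkip p fuel ('/' :: PySem.Chars.join ['/'] (q :: qs)) [] acc (hfree p (by simp)) (by simp at hlen ⊢; omega)]
      match hfm : fuel - p.length with
      | 0 => simp at hlen; omega
      | f + 1 =>
        rw [show PySem.Chars.splitOn.go ['/'] (f+1) ('/' :: PySem.Chars.join ['/'] (q :: qs)) (p.reverse ++ []) acc =
            PySem.Chars.splitOn.go ['/'] f (PySem.Chars.join ['/'] (q :: qs)) [] ((p.reverse ++ []).reverse :: acc) from by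
          simp [PySem.Chars.splitOn.go, List.isPrefixOf]]
        simp only [List.append_nil, List.reverse_reverse]
        rw [ih f (p :: acc) (by simp) (fun r hr => hfree r (by simp [hr]))
          (by simp at hlen ⊢; omega)]
        simp

theorem pvSplitJoin (parts : List (List Char)) (hne : parts ≠ []) (hf : ∀ p ∈ parts, '/' ∉ p) :
    PySem.Chars.splitOn (PySem.Chars.join ['/'] parts) ['/'] = parts := by
  rw [PySem.Chars.splitOn]
  rw [pvGoJoin parts _ [] hne hf (by omega)]
  simp

def rowsOf (s : String) : List String := (PySem.Str.split? s "/").getD []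

theorem rowsOf_eq (s : String) :
    rowsOf s = (PySem.Chars.splitOn s.toList ['/']).map String.ofList := by
  simp [rowsOf, PySem.Str.split?, PySem.Chars.split?]

theorem rowsOf_ne_nil (s : String) : rowsOf s ≠ [] := by
  rw [rowsOf_eq]
  have h := pvGoNeNil (s.toList.length + 1) s.toList [] []
  rw [PySem.Chars.splitOn] at *
  simp
  intro hc
  exact h (by simp [hc])

theorem rowsOf_free (s : String) : ∀ r ∈ rowsOf s, '/' ∉ r.toList := by
  rw [rowsOf_eq]
  intro r hr
  simp at hr
  obtain ⟨p, hp, rfl⟩ := hr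
  have := pvGoFree (s.toList.length + 1) s.toList [] [] (by omega) (by simp) (by simp) p
    (by rw [PySem.Chars.splitOn] at hp; exact hp)
  simpa using this

theorem rowsOf_join (L : List String) (hne : L ≠ []) (hf : ∀ r ∈ L, '/' ∉ r.toList) :
    rowsOf (PySem.Str.join "/" L) = L := by
  rw [rowsOf_eq]
  have ht : (PySem.Str.join "/" L).toList = PySem.Chars.join ['/'] (L.map String.toList) := by
    simp [PySem.Str.join]
  rw [ht, pvSplitJoin (L.map String.toList) (by simpa using hne)
    (by intro p hp; simp at hp; obtain ⟨r, hr, rfl⟩ := hp; exact hf r hr)]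
  simp [List.map_map, Function.comp_def]

def rotA (R : List String) : List String :=
  (PySem.List.pyRange 0 (R.length : Int) 1).map (fun i =>
    String.ofList (R.map (fun s => (PySem.Str.pyGet? s (-i - 1)).getD ' ')))

theorem pyRange_len (n : Nat) :
    PySem.List.pyRange 0 (n : Int) 1 = (List.range n).map (fun k : Nat => (k : Int)) :=
  PySem.List.pyRange_zero_natCast n

theorem length_rotA (R : List String) : (rotA R).length = R.length := by
  simp [rotA, pyRange_len]

theorem rotA_free (R : List String) (h : ∀ r ∈ R, '/' ∉ r.toList) :
    ∀ r ∈ rotA R, '/' ∉ r.toList := by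
  intro r hr
  simp [rotA, pyRange_len] at hr
  obtain ⟨k, _, rfl⟩ := hr
  simp
  intro s hs hc
  cases hg : PySem.List.pyGet? s.toList (-(k : Int) - 1) with
  | none => rw [hg] at hc; simp at hc
  | some c =>
    rw [hg] at hc; simp at hc
    subst hc
    exact h s hs (PySem.List.mem_of_pyGet?_eq_some _ hg)

def cellOf (R : List String) (i j : Nat) : Char := ((R.getD i "").toList).getD j ' '

def canon (n : Nat) (F : Nat → Nat → Char) : List String :=
  (List.range n).map (fun i => String.ofList ((List.range n).map (F i)))

def Sq (R : List String) : Prop := ∀ r ∈ R, r.toList.length = R.length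

theorem length_canon (n : Nat) (F : Nat → Nat → Char) : (canon n F).length = n := by
  simp [canon]

theorem sq_canon (n : Nat) (F : Nat → Nat → Char) : Sq (canon n F) := by
  intro r hr
  simp [canon] at hr ⊢
  obtain ⟨i, _, rfl⟩ := hr
  simp

theorem canon_congr (n : Nat) (F G : Nat → Nat → Char)
    (h : ∀ i < n, ∀ j < n, F i j = G i j) : canon n F = canon n G := by
  unfold canon
  apply List.map_congr_left
  intro i hi
  simp at hi
  congr 1
  exact List.map_congr_left (fun j hj => h i hi j (by simpa using hj))

theorem cellOf_canon (n : Nat) (F : Nat → Nat → Char) (i j : Nat) (hi : i < n) (hj : j < n) :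
    cellOf (canon n F) i j = F i j := by
  unfold cellOf canon
  rw [show ((List.range n).map (fun i => String.ofList ((List.range n).map (F i)))).getD i ""
      = String.ofList ((List.range n).map (F i)) from by
    rw [List.getD_eq_getElem _ _ (by simpa using hi)]; simp]
  simp only [String.toList_ofList]
  rw [List.getD_eq_getElem _ _ (by simpa using hj)]
  simp

theorem map_as_range {β : Type} (R : List String) (f : String → β) :
    R.map f = (List.range R.length).map (fun j => f (R.getD j "")) := by
  apply List.ext_getElem (by simp)
  intro i h1 h2
  simp only [List.getElem_map, List.getElem_range]
  rw [List.getD_eq_getElem R "" (by simpa using h2)]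

theorem rotA_canonGen (M : List String) (h : ∀ r ∈ M, M.length ≤ r.toList.length) :
    rotA M = canon M.length
      (fun i j => ((M.getD j "").toList).getD ((M.getD j "").toList.length - 1 - i) ' ') := by
  unfold rotA canon
  rw [pyRange_len, List.map_map]
  apply List.map_congr_left
  intro i hi
  simp only [Function.comp_def]
  congr 1
  rw [map_as_range M _]
  apply List.map_congr_left
  intro j hj
  simp at hi hj
  have hmem : M.getD j "" ∈ M := by
    rw [List.getD_eq_getElem _ _ (by simpa using hj)]; exact List.getElem_mem _
  have hlen : M.length ≤ (M.getD j "").toList.length := h _ hmem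
  have hcast : (-(i : Int) - 1) = -(((i + 1 : Nat)) : Int) := by push_cast; ring
  rw [show PySem.Str.pyGet? (M.getD j "") (-(i : Int) - 1)
      = PySem.List.pyGet? (M.getD j "").toList (-(i : Int) - 1) from by simp]
  generalize hg : (M.getD j "").toList = cs at hlen ⊢
  rw [hcast, PySem.List.pyGet?_neg_natCast cs (i + 1) (by omega) (by omega)]
  rw [List.getElem?_eq_getElem (by omega)]
  simp
  rw [List.getElem?_eq_getElem (by omega)]
  simp
  congr 1
  omega

theorem getD_mem' (M : List String) (j : Nat) (hj : j < M.length) : M.getD j "" ∈ M := by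
  rw [List.getD_eq_getElem _ _ hj]; exact List.getElem_mem _

theorem rotA_canonSq (M : List String) (hsq : Sq M) :
    rotA M = canon M.length (fun i j => cellOf M j (M.length - 1 - i)) := by
  rw [rotA_canonGen M (fun r hr => le_of_eq (hsq r hr).symm)]
  apply canon_congr
  intro i hi j hj
  simp only [cellOf]
  rw [hsq _ (getD_mem' M j hj)]

theorem sq_rotA (M : List String) (h : ∀ r ∈ M, M.length ≤ r.toList.length) :
    Sq (rotA M) := by
  rw [rotA_canonGen M h]
  exact sq_canon _ _

theorem rotA_ne_nil (M : List String) (h : M ≠ []) : rotA M ≠ [] := by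
  intro hc
  have := length_rotA M
  rw [hc] at this
  exact h (List.eq_nil_of_length_eq_zero this.symm)

theorem rotA_canonF (n : Nat) (F : Nat → Nat → Char) (hn : 0 < n) :
    rotA (canon n F) = canon n (fun i j => F j (n - 1 - i)) := by
  rw [show rotA (canon n F) = canon (canon n F).length
      (fun i j => cellOf (canon n F) j ((canon n F).length - 1 - i)) from
    rotA_canonSq _ (sq_canon n F)]
  rw [length_canon]
  apply canon_congr
  intro i hi j hj
  exact cellOf_canon n F j (n - 1 - i) hj (by omega)

theorem rot2_canon (M : List String) (hsq : Sq M) (hn : 0 < M.length) :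
    rotA (rotA M) = canon M.length (fun i j => cellOf M (M.length - 1 - i) (M.length - 1 - j)) := by
  rw [rotA_canonSq M hsq, rotA_canonF _ _ hn]

theorem rot3_canon (M : List String) (hsq : Sq M) (hn : 0 < M.length) :
    rotA (rotA (rotA M)) = canon M.length (fun i j => cellOf M (M.length - 1 - j) i) := by
  rw [rot2_canon M hsq hn, rotA_canonF _ _ hn]
  apply canon_congr
  intro i hi j hj
  congr 1
  omega

theorem pyCanon (n : Nat) (f : Int → Int → Char) :
    (PySem.List.pyRange 0 (n : Int) 1).map (fun i =>
      String.ofList ((PySem.List.pyRange 0 (n : Int) 1).map (fun j => f i j)))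
    = canon n (fun i j => f (i : Int) (j : Int)) := by
  simp [pyRange_len, List.map_map, canon, Function.comp_def]

theorem cell_get (gr : List String) (n i j : Nat) (hlen : gr.length = n) (hsq : Sq gr)
    (hi : i < n) (hj : j < n) :
    (PySem.Str.pyGet? (gr.getD j "") (i : Int)).getD ' ' = cellOf gr j i := by
  have hrow : (gr.getD j "").toList.length = n := by
    rw [hsq _ (getD_mem' gr j (by omega)), hlen]
  rw [show PySem.Str.pyGet? (gr.getD j "") (i : Int)
      = PySem.List.pyGet? (gr.getD j "").toList (i : Int) from by simp]
  simp only [cellOf]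
  generalize hg : (gr.getD j "").toList = cs at hrow ⊢
  rw [PySem.List.pyGet?_natCast]
  rw [List.getElem?_eq_getElem (by omega)]
  simp only [Option.getD_some]
  rw [List.getD_eq_getElem _ _ (by omega)]

theorem E2 (gr : List String) (n : Nat) (hlen : gr.length = n) (hsq : Sq gr) (hn : 0 < n) :
    (PySem.List.pyRange 0 (n : Int) 1).map (fun i =>
      String.ofList ((PySem.List.pyRange 0 (n : Int) 1).map (fun j =>
        (PySem.Str.pyGet? (PySem.List.pyGetD gr j "") ((n : Int) - 1 - i)).getD ' ')))
    = rotA gr := by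
  rw [pyCanon n _, rotA_canonSq gr hsq, hlen]
  apply canon_congr
  intro i hi j hj
  rw [show PySem.List.pyGetD gr (j : Int) "" = gr.getD j "" from by simp]
  rw [show ((n : Int) - 1 - (i : Int)) = ((n - 1 - i : Nat) : Int) from by push_cast; omega]
  exact cell_get gr n (n - 1 - i) j hlen hsq (by omega) hj

theorem E4 (gr : List String) (n : Nat) (hlen : gr.length = n) (hsq : Sq gr) (hn : 0 < n) :
    (PySem.List.pyRange 0 (n : Int) 1).map (fun i =>
      String.ofList ((PySem.List.pyRange 0 (n : Int) 1).map (fun j =>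
        (PySem.Str.pyGet? (PySem.List.pyGetD gr ((n : Int) - 1 - j) "") i).getD ' ')))
    = rotA (rotA (rotA gr)) := by
  rw [pyCanon n _, rot3_canon gr hsq (by omega), hlen]
  apply canon_congr
  intro i hi j hj
  rw [show ((n : Int) - 1 - (j : Int)) = ((n - 1 - j : Nat) : Int) from by push_cast; omega]
  rw [show PySem.List.pyGetD gr ((n - 1 - j : Nat) : Int) "" = gr.getD (n - 1 - j) "" from by simp]
  exact cell_get gr n i (n - 1 - j) hlen hsq hi (by omega)

theorem E3 (gr : List String) (n : Nat) (hlen : gr.length = n) (hsq : Sq gr) (hn : 0 < n) :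
    gr.reverse.map (fun r => (PySem.Str.slice? r none none (-1)).getD "")
    = rotA (rotA gr) := by
  rw [rot2_canon gr hsq (by omega), hlen]
  have step1 : gr.reverse.map (fun r => (PySem.Str.slice? r none none (-1)).getD "")
      = (List.range n).map (fun i => (PySem.Str.slice? (gr.getD (n - 1 - i) "") none none (-1)).getD "") := by
    apply List.ext_getElem (by simp [hlen])
    intro i h1 h2
    have hi : i < n := by simp [hlen] at h1; omega
    simp only [List.getElem_map, List.getElem_reverse, List.getElem_range]
    congr 1
    rw [List.getD_eq_getElem]
    · congr 2
      omega
    · omega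
  rw [step1]
  unfold canon
  apply List.map_congr_left
  intro i hi
  simp only [List.mem_range] at hi
  rw [PySem.Str.slice?_none_none_neg_one]
  simp only [Option.getD_some]
  congr 1
  have hrow : (gr.getD (n - 1 - i) "").toList.length = n := by
    rw [hsq _ (getD_mem' gr (n - 1 - i) (by omega)), hlen]
  apply List.ext_getElem
    (by simp only [List.length_reverse, List.length_map, List.length_range]; exact hrow)
  intro j h1 h2
  simp only [List.getElem_reverse, List.getElem_map, List.getElem_range]
  simp only [cellOf]
  generalize hg : (gr.getD (n - 1 - i) "").toList = cs at hrow h1 ⊢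
  rw [List.getD_eq_getElem _ _ (by omega)]
  congr 1
  omega

theorem E1 (R : List String) (hlong : ∀ r ∈ R, R.length ≤ r.toList.length) :
    (PySem.List.pyRange 0 (R.length : Int) 1).map (fun i =>
      String.ofList (R.map (fun row => (PySem.Str.pyGet? row (PySem.Str.len row - 1 - i)).getD ' ')))
    = rotA R := by
  unfold rotA
  rw [pyRange_len]
  apply List.map_congr_left
  intro k hk
  simp only [List.mem_map, List.mem_range] at hk
  obtain ⟨k, hkn, rfl⟩ := hk
  congr 1
  apply List.map_congr_left
  intro s hs
  have hlen : R.length ≤ s.toList.length := hlong s hs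
  have h1 : PySem.Str.len s = (s.toList.length : Int) := by
    simp [PySem.Str.len]
  rw [h1]
  rw [show ((s.toList.length : Int) - 1 - (k : Nat)) = ((s.toList.length - 1 - k : Nat) : Int) from by
    push_cast [Nat.sub_sub]; omega]
  rw [show (-((k : Nat) : Int) - 1) = -(((k + 1 : Nat)) : Int) from by push_cast; ring]
  rw [show PySem.Str.pyGet? s (((s.toList.length - 1 - k : Nat)) : Int)
      = PySem.List.pyGet? s.toList (((s.toList.length - 1 - k : Nat)) : Int) from by simp]
  rw [show PySem.Str.pyGet? s (-(((k + 1 : Nat)) : Int))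
      = PySem.List.pyGet? s.toList (-(((k + 1 : Nat)) : Int)) from by simp]
  rw [PySem.List.pyGet?_natCast, PySem.List.pyGet?_neg_natCast s.toList (k + 1) (by omega) (by omega)]
  have he : s.toList.length - 1 - k = s.toList.length - (k + 1) := by omega
  rw [he]


theorem E5 (R : List String) (hlong : ∀ r ∈ R, R.length ≤ r.toList.length) :
    (PySem.List.pyRange 0 (R.length : Int) 1).map (fun i =>
      String.ofList (R.map (fun row => (PySem.Str.pyGet? row i).getD ' ')))
    = rotA (R.map (fun r => (PySem.Str.slice? r none none (-1)).getD "")) := by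
  unfold rotA
  rw [List.length_map, pyRange_len]
  apply List.map_congr_left
  intro k hk
  simp only [List.mem_map, List.mem_range] at hk
  obtain ⟨k, hkn, rfl⟩ := hk
  congr 1
  rw [List.map_map]
  apply List.map_congr_left
  intro s hs
  have hlen : R.length ≤ s.toList.length := hlong s hs
  simp only [Function.comp_def, PySem.Str.slice?_none_none_neg_one, Option.getD_some]
  rw [show (-((k : Nat) : Int) - 1) = -(((k + 1 : Nat)) : Int) from by push_cast; ring]
  rw [show PySem.Str.pyGet? (String.ofList s.toList.reverse) (-(((k + 1 : Nat)) : Int))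
      = PySem.List.pyGet? s.toList.reverse (-(((k + 1 : Nat)) : Int)) from by simp]
  rw [show PySem.Str.pyGet? s ((k : Nat) : Int)
      = PySem.List.pyGet? s.toList ((k : Nat) : Int) from by simp]
  rw [PySem.List.pyGet?_natCast,
    PySem.List.pyGet?_neg_natCast s.toList.reverse (k + 1) (by omega) (by rw [List.length_reverse]; omega)]
  rw [List.getElem?_eq_getElem (l := s.toList.reverse) (by rw [List.length_reverse]; omega),
    List.getElem?_eq_getElem (l := s.toList) (by omega)]
  simp only [List.getElem_reverse, List.length_reverse]
  simp only [Option.getD_some]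
  congr 1
  omega

theorem rotateLPy_eq (s : String) :
    rotateLPy s = PySem.Str.join "/" (rotA (rowsOf s)) := rfl

theorem rowsOf_flip (g : String) :
    rowsOf (flipPy g) = (rowsOf g).map (fun r => (PySem.Str.slice? r none none (-1)).getD "") := by
  have hfree2 : ∀ r ∈ (rowsOf g).map (fun r => (PySem.Str.slice? r none none (-1)).getD ""),
      '/' ∉ r.toList := by
    intro r hr
    simp only [List.mem_map] at hr
    obtain ⟨s, hs, rfl⟩ := hr
    rw [PySem.Str.slice?_none_none_neg_one]
    simp
    exact fun hc => rowsOf_free g s hs hc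
  exact rowsOf_join _ (by simp only [ne_eq, List.map_eq_nil_iff]; exact rowsOf_ne_nil g) hfree2

theorem genA_eq (g : String) : genAllMatches g =
    [rotateLPy g, rotateLPy (rotateLPy g), rotateLPy (rotateLPy (rotateLPy g)),
     rotateLPy (rotateLPy (rotateLPy (rotateLPy g))),
     rotateLPy (flipPy g), rotateLPy (rotateLPy (flipPy g)),
     rotateLPy (rotateLPy (rotateLPy (flipPy g))),
     rotateLPy (rotateLPy (rotateLPy (rotateLPy (flipPy g))))] := by
  unfold genAllMatches
  rw [show PySem.List.pyRange 0 4 1 = [0, 1, 2, 3] from by decide]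
  simp [List.foldl]

theorem genB_eq (g : String) : genAllMatches_alt g =
    (fun (rows : List String) (n : Int) =>
      (fun (r1 f1 : List String) =>
        (fun block => block r1 ++ block f1)
        (fun (gr : List String) =>
          [ PySem.Str.join "/" gr,
            PySem.Str.join "/" ((PySem.List.pyRange 0 n 1).map (fun i =>
              String.ofList ((PySem.List.pyRange 0 n 1).map (fun j =>
                (PySem.Str.pyGet? (PySem.List.pyGetD gr j "") (n - 1 - i)).getD ' ')))),
            PySem.Str.join "/" (gr.reverse.map (fun r => (PySem.Str.slice? r none none (-1)).getD "")),
            PySem.Str.join "/" ((PySem.List.pyRange 0 n 1).map (fun i =>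
              String.ofList ((PySem.List.pyRange 0 n 1).map (fun j =>
                (PySem.Str.pyGet? (PySem.List.pyGetD gr (n - 1 - j) "") i).getD ' ')))) ]))
      ((PySem.List.pyRange 0 n 1).map (fun i =>
        String.ofList (rows.map (fun row => (PySem.Str.pyGet? row (PySem.Str.len row - 1 - i)).getD ' '))))
      ((PySem.List.pyRange 0 n 1).map (fun i =>
        String.ofList (rows.map (fun row => (PySem.Str.pyGet? row i).getD ' ')))))
    (rowsOf g) ((rowsOf g).length : Int) := rfl

-- ===== VERDICT (by name: the statement is the Claim_ definition above) =====
theorem genAllMatches_spec : Claim_equal_genAllMatches := by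
  intro g _ hpre
  unfold Spec_genAllMatches
  have hlong : ∀ r ∈ rowsOf g, (rowsOf g).length ≤ r.toList.length := by
    intro r hr
    have h := hpre r hr
    rw [show PySem.Str.len r = (r.toList.length : Int) from by simp [PySem.Str.len]] at h
    exact_mod_cast h
  have hne := rowsOf_ne_nil g
  have hfree := rowsOf_free g
  have hn : 0 < (rowsOf g).length := List.length_pos_of_ne_nil hne
  have hM1len : (rotA (rowsOf g)).length = (rowsOf g).length := length_rotA _
  have hM1sq : Sq (rotA (rowsOf g)) := sq_rotA _ hlong
  have hM1ne : rotA (rowsOf g) ≠ [] := rotA_ne_nil _ hne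
  have hM1free : ∀ r ∈ rotA (rowsOf g), '/' ∉ r.toList := rotA_free _ hfree
  have hlong2 : ∀ r ∈ (rowsOf g).map (fun r => (PySem.Str.slice? r none none (-1)).getD ""),
      ((rowsOf g).map (fun r => (PySem.Str.slice? r none none (-1)).getD "")).length ≤ r.toList.length := by
    intro r hr
    simp only [List.mem_map] at hr
    obtain ⟨s, hs, rfl⟩ := hr
    rw [PySem.Str.slice?_none_none_neg_one]
    simp only [Option.getD_some, String.toList_ofList, List.length_reverse, List.length_map]
    exact hlong s hs
  have hfree2 : ∀ r ∈ (rowsOf g).map (fun r => (PySem.Str.slice? r none none (-1)).getD ""),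
      '/' ∉ r.toList := by
    intro r hr
    simp only [List.mem_map] at hr
    obtain ⟨s, hs, rfl⟩ := hr
    rw [PySem.Str.slice?_none_none_neg_one]
    simp
    exact fun hc => hfree s hs hc
  have hne2 : (rowsOf g).map (fun r => (PySem.Str.slice? r none none (-1)).getD "") ≠ [] := by
    simp [hne]
  have hM2len : (rotA ((rowsOf g).map (fun r => (PySem.Str.slice? r none none (-1)).getD ""))).length
      = (rowsOf g).length := by rw [length_rotA, List.length_map]
  have hM2sq : Sq (rotA ((rowsOf g).map (fun r => (PySem.Str.slice? r none none (-1)).getD ""))) :=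
    sq_rotA _ hlong2
  have hM2ne : rotA ((rowsOf g).map (fun r => (PySem.Str.slice? r none none (-1)).getD "")) ≠ [] :=
    rotA_ne_nil _ hne2
  have hM2free : ∀ r ∈ rotA ((rowsOf g).map (fun r => (PySem.Str.slice? r none none (-1)).getD "")),
      '/' ∉ r.toList := rotA_free _ hfree2
  rw [genA_eq, genB_eq]
  simp only []
  rw [E1 (rowsOf g) hlong, E5 (rowsOf g) hlong]
  rw [E2 _ _ hM1len hM1sq hn, E3 _ _ hM1len hM1sq hn, E4 _ _ hM1len hM1sq hn]
  rw [E2 _ _ hM2len hM2sq hn, E3 _ _ hM2len hM2sq hn, E4 _ _ hM2len hM2sq hn]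
  simp only [rotateLPy_eq]
  rw [rowsOf_flip g]
  rw [rowsOf_join _ hM1ne hM1free]
  rw [rowsOf_join _ (rotA_ne_nil _ hM1ne) (rotA_free _ hM1free)]
  rw [rowsOf_join _ (rotA_ne_nil _ (rotA_ne_nil _ hM1ne)) (rotA_free _ (rotA_free _ hM1free))]
  rw [rowsOf_join _ hM2ne hM2free]
  rw [rowsOf_join _ (rotA_ne_nil _ hM2ne) (rotA_free _ hM2free)]
  rw [rowsOf_join _ (rotA_ne_nil _ (rotA_ne_nil _ hM2ne)) (rotA_free _ (rotA_free _ hM2free))]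
  rfl
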